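-- pv_equiv track=rewrite | github.com/daniel70/eyerisk | tools/import/import_iso_27001.py | get_position_dict
-- ===== SOURCE A (Python) =====
-- from collections import namedtuple, OrderedDict
--
-- def find_position(values, search):
--     """search for a string position in a list, return None if not exists"""
--     try:
--         pos = values.index(search)
--     except ValueError:
--         pos = None
--     return pos
--
-- def get_position_dict(values, search_list):
--     """create an ordereddict with all existing items in search_list and their positions"""
--     parts = OrderedDict()
--     previous = None
--     for search in search_list:
--         pos = find_position(values, search)
--         if pos is not None:
--             parts[search] = [pos+1,]
--             if previous is not None:
--                 parts[previous].append(pos)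
--             previous = search
--
--     if previous is not None:
--         parts[previous].append(len(values))
--     return parts
-- ===== SOURCE B (Python) =====
-- from collections import OrderedDict
--
-- def get_position_dict(values, search_list):
--     """create an ordereddict with all existing items in search_list and their positions"""
--     first = {}
--     for i, v in enumerate(values):
--         if v not in first:
--             first[v] = i
--     parts = OrderedDict()
--     nxt = len(values)
--     for s in reversed(search_list):
--         p = first.get(s)
--         if p is not None:
--             parts[s] = [p + 1, nxt]
--             nxt = p
--     return OrderedDict(reversed(parts.items()))
-- ===== Notes on version B (the rewrite author's own statement) =====
-- stated objective: alternative
-- what changed: B builds a value->first-index dict in one pass over values and then walks search_list backwards carrying the next found position as an accumulator, emitting each entry complete and reversing at the end, instead of A's per-item values.index scan with forward back-patching of the previous key; Pre_ excludes search lists that repeat an item present in values, where A's overwrite-plus-back-patch of the same OrderedDict key gives accidental orders and values.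
-- outside the precondition, e.g. on get_position_dict(['a', 'b'], ['a', 'a']): A returns {'a': [1, 0, 2]}, B returns {'a': [1, 0]}
import Mathlib
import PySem

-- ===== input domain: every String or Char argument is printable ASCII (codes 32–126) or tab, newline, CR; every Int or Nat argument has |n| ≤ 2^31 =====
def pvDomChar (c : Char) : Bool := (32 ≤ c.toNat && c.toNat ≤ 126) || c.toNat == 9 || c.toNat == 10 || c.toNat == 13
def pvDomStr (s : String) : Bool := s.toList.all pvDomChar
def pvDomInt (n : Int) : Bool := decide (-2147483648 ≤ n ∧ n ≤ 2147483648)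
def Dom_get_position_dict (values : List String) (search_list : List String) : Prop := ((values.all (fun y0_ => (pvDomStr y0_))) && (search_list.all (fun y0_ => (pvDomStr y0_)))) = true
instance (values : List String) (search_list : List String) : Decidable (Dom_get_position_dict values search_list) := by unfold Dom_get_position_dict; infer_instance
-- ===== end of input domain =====

-- B precomputes a value->first-index dict and walks search_list backwards with a next-position
-- accumulator (output built back-to-front), replacing A's per-item values.index scan with
-- forward back-patching of the previous key's entry.


-- ===== PORT A =====
def find_position (values : List String) (search : String) : Option Nat :=
  PySem.List.index? values search

-- loop body of A's `for search in search_list` (state: parts, previous)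
def pvStepA (values : List String) (st : PySem.Dict String (List Int) × Option String)
    (search : String) : PySem.Dict String (List Int) × Option String :=
  match find_position values search with
  | none => st
  | some pos =>
    let parts := st.1.insert search [(pos : Int) + 1]
    let parts := match st.2 with
      | none => parts
      | some previous => parts.modify previous [] (fun l => l ++ [(pos : Int)])
    (parts, some search)

def get_position_dict (values : List String) (search_list : List String) : List (String × List Int) :=
  let st := search_list.foldl (pvStepA values) (PySem.Dict.empty, none)
  (match st.2 with
   | none => st.1
   | some previous => st.1.modify previous [] (fun l => l ++ [(values.length : Int)])).items

-- ===== PORT B =====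
-- loop body of B's backward pass `for s in reversed(search_list)` (state: parts, nxt)
def pvStepBack (first : PySem.Dict String Int)
    (st : PySem.Dict String (List Int) × Int) (s : String) :
    PySem.Dict String (List Int) × Int :=
  match first.get? s with
  | none => st
  | some p => (st.1.insert s [p + 1, st.2], p)

def get_position_dict_alt (values : List String) (search_list : List String) : List (String × List Int) :=
  let first := (PySem.List.enumerate values).foldl
    (fun (d : PySem.Dict String Int) iv => if d.contains iv.2 then d else d.insert iv.2 iv.1)
    PySem.Dict.empty
  let st := search_list.reverse.foldl (pvStepBack first)
    (PySem.Dict.empty, (values.length : Int))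
  -- OrderedDict(reversed(parts.items()))
  (st.1.items.reverse.foldl
    (fun (d : PySem.Dict String (List Int)) kv => d.insert kv.1 kv.2) PySem.Dict.empty).items

-- ===== PRECONDITION & SPEC =====
-- Pre_ excludes search lists that repeat an item present in values: on those A overwrites the
-- existing OrderedDict entry and back-patches the same key, and the resulting order and values
-- are accidents of the implementation (duplicate-key corner).
def Pre_get_position_dict (values : List String) (search_list : List String) : Prop :=
  (search_list.filter (fun s => decide (s ∈ values))).Nodup
instance (values : List String) (search_list : List String) : Decidable (Pre_get_position_dict values search_list) := by unfold Pre_get_position_dict; infer_instance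

def pvWitness_get_position_dict : List String × List String := (["a", "b", "c"], ["b", "x", "a"])

def Spec_get_position_dict (values : List String) (search_list : List String) (out : List (String × List Int)) : Prop := out = get_position_dict_alt values search_list
instance (values : List String) (search_list : List String) (out : List (String × List Int)) : Decidable (Spec_get_position_dict values search_list out) := by unfold Spec_get_position_dict; infer_instance

-- ===== CLAIM (what is proved, stated in full; the proofs are below) =====
def Claim_equal_get_position_dict : Prop := ∀ (values : List String) (search_list : List String), Dom_get_position_dict values search_list → Pre_get_position_dict values search_list → Spec_get_position_dict values search_list (get_position_dict values search_list)

-- ===== LEMMAS AND PROOFS =====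

-- the found items of search_list with their first positions in values
def pvFound (values : List String) (search_list : List String) : List (String × Int) :=
  search_list.filterMap (fun s => (PySem.List.index? values s).map (fun k => (s, (k : Int))))

-- position of the next found item; n when there is none
def pvFp (n : Int) : List (String × Int) → Int
  | [] => n
  | (_, p) :: _ => p

-- the association list both programs produce on duplicate-free found items
def pvOut (n : Int) : List (String × Int) → List (String × List Int)
  | [] => []
  | (s, p) :: rest => (s, [p + 1, pvFp n rest]) :: pvOut n rest

-- A's loop, restricted to the found items
def pvStepA' (st : PySem.Dict String (List Int) × Option String) (x : String × Int) :
    PySem.Dict String (List Int) × Option String :=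
  let parts := st.1.insert x.1 [x.2 + 1]
  let parts := match st.2 with
    | none => parts
    | some previous => parts.modify previous [] (fun l => l ++ [x.2])
  (parts, some x.1)

-- A's trailing fixup
def pvFinalize (n : Int) (st : PySem.Dict String (List Int) × Option String) :
    PySem.Dict String (List Int) :=
  match st.2 with
  | none => st.1
  | some previous => st.1.modify previous [] (fun l => l ++ [n])

-- intermediate form of A: the found items zipped with their successors' positions
def pvStepB (st : PySem.Dict String (List Int) × Option String)
    (x : (String × Int) × Int) : PySem.Dict String (List Int) × Option String :=
  let val := [x.1.2 + 1] ++ (if st.2 = some x.1.1 then [x.1.2] else []) ++ [x.2]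
  (st.1.insert x.1.1 val, some x.1.1)

lemma pv_first_get (values : List String) (s : String) :
    ∀ (start : Int) (d : PySem.Dict String Int),
      ((PySem.List.enumerate values start).foldl
        (fun (d : PySem.Dict String Int) iv => if d.contains iv.2 then d else d.insert iv.2 iv.1) d).get? s
      = if d.contains s then d.get? s
        else (PySem.List.index? values s).map (fun k => (k : Int) + start) := by
  induction values with
  | nil =>
    intro start d
    by_cases hc : d.contains s = true
    · simp [PySem.List.enumerate, hc]
    · have hc' : d.contains s = false := by simpa using hc
      simp [PySem.List.enumerate, hc', PySem.Dict.get?_eq_none_iff_contains]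
  | cons v vs ih =>
    intro start d
    rw [PySem.List.enumerate_cons, List.foldl_cons]
    by_cases hv : s = v
    · subst hv
      rw [PySem.List.index?_cons_self]
      by_cases hc : d.contains s = true
      · simp only [hc, if_true]
        rw [ih]
        simp [hc]
      · have hc' : d.contains s = false := by simpa using hc
        simp only [hc', Bool.false_eq_true, if_false]
        rw [ih]
        simp [PySem.Dict.contains_insert_self, PySem.Dict.get?_insert_self]
    · rw [PySem.List.index?_cons_of_ne (x := v) (v := s) (xs := vs) (Ne.symm hv)]
      by_cases hc : d.contains v = true
      · simp only [hc, if_true]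
        rw [ih]
        cases hi : PySem.List.index? vs s with
        | none => simp
        | some k => simp; split <;> [rfl; (push_cast; ring)]
      · have hc' : d.contains v = false := by simpa using hc
        simp only [hc', Bool.false_eq_true, if_false]
        rw [ih]
        have e1 : (d.insert v start).contains s = d.contains s := by
          simp [PySem.Dict.contains_insert, beq_iff_eq, hv]
        have e2 : (d.insert v start).get? s = d.get? s :=
          PySem.Dict.get?_insert_of_ne _ _ hv
        rw [e1, e2]
        cases hi : PySem.List.index? vs s with
        | none => simp
        | some k => simp; split <;> [rfl; (push_cast; ring)]

lemma pv_foldA_eq (values : List String) (search_list : List String) :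
    ∀ st, search_list.foldl (pvStepA values) st = (pvFound values search_list).foldl pvStepA' st := by
  induction search_list with
  | nil => intro st; simp [pvFound]
  | cons s rest ih =>
    intro st
    rw [List.foldl_cons]
    cases h : PySem.List.index? values s with
    | none =>
      have hA : pvStepA values st s = st := by
        unfold pvStepA find_position; rw [h]
      have hF : pvFound values (s :: rest) = pvFound values rest := by
        unfold pvFound; rw [List.filterMap_cons, h]; rfl
      rw [hA, hF]; exact ih st
    | some k =>
      have hA : pvStepA values st s = pvStepA' st (s, (k : Int)) := by
        unfold pvStepA pvStepA' find_position; rw [h]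
      have hF : pvFound values (s :: rest) = (s, (k : Int)) :: pvFound values rest := by
        unfold pvFound; rw [List.filterMap_cons, h]; rfl
      rw [hA, hF, List.foldl_cons]; exact ih _

lemma pv_insert_insert_comm {q s : String} {v w : List Int} (d : PySem.Dict String (List Int))
    (hq : d.contains q = true) (hne : q ≠ s) :
    (d.insert s v).insert q w = (d.insert q w).insert s v := by
  apply PySem.Dict.ext
  by_cases hs : d.contains s = true
  · simp only [PySem.Dict.items_insert, PySem.Dict.contains_insert, hq, hs, Bool.or_true,
      if_true, List.map_map]
    apply List.map_congr_left
    intro p _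
    by_cases h1 : p.1 = s <;> by_cases h2 : p.1 = q <;>
      simp_all [beq_iff_eq, Ne.symm hne]
  · have hs' : d.contains s = false := by simpa using hs
    have h2 : ((d.insert q w).contains s) = false := by
      simp [PySem.Dict.contains_insert, Ne.symm hne, hs']
    simp only [PySem.Dict.items_insert, PySem.Dict.contains_insert, hq, hs', h2, beq_iff_eq,
      Bool.or_true, if_true, if_false, Bool.false_eq_true, List.map_append,
      List.map_map]
    congr 1
    simp [Ne.symm hne]

lemma pv_zip_nexts_cons (n : Int) (x : String × Int) (rest : List (String × Int)) :
    ((x :: rest).zip (((x :: rest).drop 1).map (fun y => y.2) ++ [n]))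
    = (x, pvFp n rest) :: rest.zip ((rest.drop 1).map (fun y => y.2) ++ [n]) := by
  cases rest with
  | nil => simp [pvFp]
  | cons y t => simp [pvFp]

lemma pv_main_some (n : Int) :
    ∀ (l : List (String × Int)) (parts : PySem.Dict String (List Int)) (q : String),
      parts.contains q = true →
      pvFinalize n (l.foldl pvStepA' (parts, some q))
      = ((l.zip ((l.drop 1).map (fun y => y.2) ++ [n])).foldl pvStepB
          (parts.modify q [] (fun v => v ++ [pvFp n l]), some q)).1 := by
  intro l
  induction l with
  | nil => intro parts q hq; simp [pvFinalize, pvFp]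
  | cons x rest ih =>
    intro parts q hq
    obtain ⟨s, p⟩ := x
    rw [pv_zip_nexts_cons, List.foldl_cons, List.foldl_cons]
    have hstepA : pvStepA' (parts, some q) (s, p)
        = ((parts.insert s [p + 1]).modify q [] (fun l => l ++ [p]), some s) := rfl
    rw [hstepA]
    have hc2 : ((parts.insert s [p + 1]).modify q [] (fun l => l ++ [p])).contains s = true := by
      simp [PySem.Dict.modify, PySem.Dict.contains_insert, PySem.Dict.contains_insert_self]
    rw [ih _ s hc2]
    congr 2
    show (((parts.insert s [p + 1]).modify q [] (fun l => l ++ [p])).modify s []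
        (fun v => v ++ [pvFp n rest]), some s)
      = pvStepB (parts.modify q [] (fun v => v ++ [pvFp n ((s, p) :: rest)]), some q)
          ((s, p), pvFp n rest)
    by_cases hqs : q = s
    · subst hqs
      simp [pvStepB, PySem.Dict.modify, pvFp, PySem.Dict.getD_insert_self,
        PySem.Dict.insert_insert_self]
    · simp only [pvStepB, PySem.Dict.modify, pvFp]
      rw [PySem.Dict.getD_insert_of_ne _ _ _ hqs]
      rw [pv_insert_insert_comm parts hq hqs]
      rw [PySem.Dict.getD_insert_self, PySem.Dict.insert_insert_self]
      simp [hqs]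

lemma pv_main_none (n : Int) (l : List (String × Int)) (parts : PySem.Dict String (List Int)) :
    pvFinalize n (l.foldl pvStepA' (parts, none))
    = ((l.zip ((l.drop 1).map (fun y => y.2) ++ [n])).foldl pvStepB (parts, none)).1 := by
  cases l with
  | nil => simp [pvFinalize]
  | cons x rest =>
    obtain ⟨s, p⟩ := x
    rw [pv_zip_nexts_cons, List.foldl_cons, List.foldl_cons]
    have hstepA : pvStepA' (parts, none) (s, p) = (parts.insert s [p + 1], some s) := rfl
    have hstepB : pvStepB (parts, none) ((s, p), pvFp n rest)
        = (parts.insert s ([p + 1] ++ [pvFp n rest]), some s) := by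
      simp [pvStepB]
    rw [hstepA, hstepB, pv_main_some n rest _ s (PySem.Dict.contains_insert_self _ _ _)]
    congr 2
    simp [PySem.Dict.modify, PySem.Dict.getD_insert_self, PySem.Dict.insert_insert_self]

lemma pv_found_keys (values : List String) (search_list : List String) :
    (pvFound values search_list).map Prod.fst
    = search_list.filter (fun s => decide (s ∈ values)) := by
  induction search_list with
  | nil => simp [pvFound]
  | cons s rest ih =>
    rw [List.filter_cons]
    cases h : PySem.List.index? values s with
    | none =>
      have hF : pvFound values (s :: rest) = pvFound values rest := by
        unfold pvFound; rw [List.filterMap_cons, h]; rfl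
      have hmem : ¬ s ∈ values := (PySem.List.index?_eq_none_iff _ _).1 h
      rw [hF, ih]; simp [hmem]
    | some k =>
      have hF : pvFound values (s :: rest) = (s, (k : Int)) :: pvFound values rest := by
        unfold pvFound; rw [List.filterMap_cons, h]; rfl
      have hmem : s ∈ values := (PySem.List.index?_isSome_iff values s).1 (by rw [h]; rfl)
      rw [hF, List.map_cons, ih]; simp [hmem]

lemma pv_out_keys (n : Int) (l : List (String × Int)) :
    (pvOut n l).map Prod.fst = l.map Prod.fst := by
  induction l with
  | nil => rfl
  | cons x rest ih => obtain ⟨s, p⟩ := x; simpa [pvOut] using ih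

-- the forward zip fold produces exactly pvOut when the keys are duplicate-free
lemma pv_zip_out (n : Int) :
    ∀ (l : List (String × Int)) (parts : PySem.Dict String (List Int)) (prev : Option String),
      (l.map Prod.fst).Nodup →
      (∀ s ∈ l.map Prod.fst, parts.contains s = false) →
      (∀ q, prev = some q → q ∉ l.map Prod.fst) →
      ((l.zip ((l.drop 1).map (fun y => y.2) ++ [n])).foldl pvStepB (parts, prev)).1.items
      = parts.items ++ pvOut n l := by
  intro l
  induction l with
  | nil => intro parts prev _ _ _; simp [pvOut]
  | cons x rest ih =>
    intro parts prev hnd hfresh hprev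
    obtain ⟨s, p⟩ := x
    rw [List.map_cons, List.nodup_cons] at hnd
    rw [pv_zip_nexts_cons, List.foldl_cons]
    have hps : prev ≠ some s := by
      intro h
      exact hprev s h (by simp)
    have hstep : pvStepB (parts, prev) ((s, p), pvFp n rest)
        = (parts.insert s [p + 1, pvFp n rest], some s) := by
      cases prev with
      | none => simp [pvStepB]
      | some q =>
        have : ¬ (some q = some s) := hps
        simp [pvStepB, this]
    rw [hstep]
    have hsr : s ∉ rest.map Prod.fst := hnd.1
    have hndr : (rest.map Prod.fst).Nodup := hnd.2
    have hfr : ∀ t ∈ rest.map Prod.fst, (parts.insert s [p + 1, pvFp n rest]).contains t = false := by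
      intro t ht
      have hts : t ≠ s := fun h => hsr (h ▸ ht)
      rw [PySem.Dict.contains_insert]
      simp [hts, hfresh t (by simp [ht])]
    rw [ih _ (some s) hndr hfr (by intro q hq; rw [Option.some.injEq] at hq; rw [← hq]; exact hsr)]
    have hcs : parts.contains s = false := hfresh s (by simp)
    rw [PySem.Dict.items_insert_of_not_contains _ _ hcs]
    simp [pvOut]

-- B's backward fold: items are pvOut reversed, accumulator is the head position
lemma pv_back (n : Int) :
    ∀ (l : List (String × Int)), (l.map Prod.fst).Nodup →
      (l.reverse.foldl
        (fun (st : PySem.Dict String (List Int) × Int) (x : String × Int) =>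
          (st.1.insert x.1 [x.2 + 1, st.2], x.2))
        (PySem.Dict.empty, n)).1.items = (pvOut n l).reverse
      ∧ (l.reverse.foldl
        (fun (st : PySem.Dict String (List Int) × Int) (x : String × Int) =>
          (st.1.insert x.1 [x.2 + 1, st.2], x.2))
        (PySem.Dict.empty, n)).2 = pvFp n l := by
  intro l
  induction l with
  | nil => intro _; exact ⟨rfl, rfl⟩
  | cons x rest ih =>
    intro hnd
    obtain ⟨s, p⟩ := x
    rw [List.map_cons, List.nodup_cons] at hnd
    have hsr : s ∉ rest.map Prod.fst := hnd.1
    obtain ⟨ih1, ih2⟩ := ih hnd.2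
    rw [List.reverse_cons, List.foldl_append, List.foldl_cons, List.foldl_nil]
    set st := (rest.reverse.foldl
        (fun (st : PySem.Dict String (List Int) × Int) (x : String × Int) =>
          (st.1.insert x.1 [x.2 + 1, st.2], x.2))
        (PySem.Dict.empty, n)) with hst
    have hkeys : st.1.keys = ((pvOut n rest).reverse).map Prod.fst := by
      simp only [PySem.Dict.keys, ih1]
    have hcs : st.1.contains s = false := by
      rw [Bool.eq_false_iff]
      intro hc
      apply hsr
      have hmem : s ∈ ((pvOut n rest).reverse).map Prod.fst := by
        rw [← hkeys]
        exact (PySem.Dict.contains_iff_mem_keys _ _).1 hc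
      rw [List.map_reverse] at hmem
      have := List.mem_reverse.1 hmem
      rwa [pv_out_keys] at this
    constructor
    · rw [PySem.Dict.items_insert_of_not_contains _ _ hcs, ih1, ih2]
      simp [pvOut]
    · simp [pvFp]

-- keys of pvFound are Nodup under Pre_
lemma pv_found_nodup (values : List String) (search_list : List String)
    (h : Pre_get_position_dict values search_list) :
    ((pvFound values search_list).map Prod.fst).Nodup := by
  rw [pv_found_keys]; exact h

-- the first-occurrence dict of B answers exactly values.index
lemma pv_firstD_get (values : List String) (s : String) :
    ((PySem.List.enumerate values).foldl
      (fun (d : PySem.Dict String Int) iv => if d.contains iv.2 then d else d.insert iv.2 iv.1)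
      PySem.Dict.empty).get? s = (PySem.List.index? values s).map (fun k => (k : Int)) := by
  have hget := pv_first_get values s 0 PySem.Dict.empty
  rw [if_neg (by simp [PySem.Dict.contains_empty])] at hget
  simpa using hget

-- B's raw backward loop equals the backward loop over pvFound
lemma pv_foldB_eq (values : List String) (search_list : List String) :
    ∀ st, search_list.foldl
        (pvStepBack ((PySem.List.enumerate values).foldl
          (fun (d : PySem.Dict String Int) iv => if d.contains iv.2 then d else d.insert iv.2 iv.1)
          PySem.Dict.empty)) st
      = (pvFound values search_list).foldl
        (fun (st : PySem.Dict String (List Int) × Int) (x : String × Int) =>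
          (st.1.insert x.1 [x.2 + 1, st.2], x.2)) st := by
  induction search_list with
  | nil => intro st; simp [pvFound]
  | cons s rest ih =>
    intro st
    rw [List.foldl_cons]
    cases h : PySem.List.index? values s with
    | none =>
      have hB : pvStepBack ((PySem.List.enumerate values).foldl
          (fun (d : PySem.Dict String Int) iv => if d.contains iv.2 then d else d.insert iv.2 iv.1)
          PySem.Dict.empty) st s = st := by
        unfold pvStepBack; rw [pv_firstD_get, h]; rfl
      have hF : pvFound values (s :: rest) = pvFound values rest := by
        unfold pvFound; rw [List.filterMap_cons, h]; rfl
      rw [hB, hF]; exact ih st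
    | some k =>
      have hB : pvStepBack ((PySem.List.enumerate values).foldl
          (fun (d : PySem.Dict String Int) iv => if d.contains iv.2 then d else d.insert iv.2 iv.1)
          PySem.Dict.empty) st s = (st.1.insert s [(k : Int) + 1, st.2], (k : Int)) := by
        unfold pvStepBack; rw [pv_firstD_get, h]; rfl
      have hF : pvFound values (s :: rest) = (s, (k : Int)) :: pvFound values rest := by
        unfold pvFound; rw [List.filterMap_cons, h]; rfl
      rw [hB, hF, List.foldl_cons]; exact ih _

-- ===== VERDICT (by name: the statement is the Claim_ definition above) =====
theorem get_position_dict_spec : Claim_equal_get_position_dict := by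
  intro values search_list _ hpre
  simp only [Spec_get_position_dict, get_position_dict, get_position_dict_alt]
  have hnd := pv_found_nodup values search_list hpre
  set n : Int := (values.length : Int)
  set l := pvFound values search_list with hl
  -- A side
  rw [pv_foldA_eq]
  have hA := pv_main_none n l PySem.Dict.empty
  simp only [pvFinalize] at hA
  rw [hA, pv_zip_out n l PySem.Dict.empty none hnd
      (fun s _ => PySem.Dict.contains_empty s) (by simp)]
  -- B side
  have hrev : search_list.reverse.foldl
      (pvStepBack ((PySem.List.enumerate values).foldl
        (fun (d : PySem.Dict String Int) iv => if d.contains iv.2 then d else d.insert iv.2 iv.1)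
        PySem.Dict.empty)) (PySem.Dict.empty, n)
      = l.reverse.foldl
        (fun (st : PySem.Dict String (List Int) × Int) (x : String × Int) =>
          (st.1.insert x.1 [x.2 + 1, st.2], x.2)) (PySem.Dict.empty, n) := by
    rw [pv_foldB_eq values search_list.reverse]
    congr 1
    show pvFound values search_list.reverse = l.reverse
    unfold pvFound
    exact List.filterMap_reverse
  rw [hrev, (pv_back n l hnd).1, List.reverse_reverse]
  rw [PySem.Dict.items_foldl_insert_fresh (pvOut n l) Prod.fst Prod.snd PySem.Dict.empty
      (fun a _ => PySem.Dict.contains_empty a.1) (by rw [pv_out_keys]; exact hnd)]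
  simp
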